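-- pv_equiv track=rewrite | github.com/nbalance97/Programmers | LV 1/약수의 개수와 덧셈.py | solution
-- ===== SOURCE A (Python) =====
-- def solution(left, right):
--     count = [0] * 1001 # 약수의 개수 저장
--     answer = 0
--     # 현재 숫자의 배수들을 모두 약수의 개수 + 1개 해주는 방식으로 전체 약수의 개수 저장
--     for i in range(1, 1001):
--         for j in range(i, 1001, i):
--             count[j] += 1
--
--     for i in range(left, right+1):
--         if count[i] % 2 == 1:
--             answer -= i
--         else:
--             answer += i
--
--     return answer
-- ===== SOURCE B (Python) =====
-- # B: no sieve -- the divisor count of n is odd exactly when n is a perfect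
-- # square, so a fixed sign table over the same 1001 slots gives each term's sign.
-- _SQUARES = {k * k for k in range(1, 32)}
-- _SIGN = [-1 if n in _SQUARES else 1 for n in range(1001)]
--
--
-- def solution(left, right):
--     return sum(_SIGN[i] * i for i in range(left, right + 1))
-- ===== Notes on version B (the rewrite author's own statement) =====
-- stated objective: faster
-- what changed: Replaces the double-loop multiples sieve that tallies every number's divisor count with a direct sign table built from the number-theoretic fact that the divisor count is odd exactly for perfect squares (31 squares below 1001), keeping the same 1001-slot table indexing for the summation loop.
import Mathlib
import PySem

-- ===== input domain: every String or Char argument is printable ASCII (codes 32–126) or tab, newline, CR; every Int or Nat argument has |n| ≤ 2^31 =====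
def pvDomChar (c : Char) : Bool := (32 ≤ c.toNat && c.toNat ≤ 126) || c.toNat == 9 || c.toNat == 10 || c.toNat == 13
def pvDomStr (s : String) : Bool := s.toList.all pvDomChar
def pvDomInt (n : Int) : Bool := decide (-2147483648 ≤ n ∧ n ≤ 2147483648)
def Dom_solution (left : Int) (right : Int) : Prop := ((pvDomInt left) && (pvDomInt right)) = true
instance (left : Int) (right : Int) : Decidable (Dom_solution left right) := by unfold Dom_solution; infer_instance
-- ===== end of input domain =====

-- B replaces A's per-call multiples sieve by a fixed sign table (divisor count is odd
-- exactly for perfect squares); objective: faster table setup, same summation loop.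

-- ===== PORT A =====
def solution (left : Int) (right : Int) : Int :=
  -- count = [0] * 1001; for i in range(1, 1001): for j in range(i, 1001, i): count[j] += 1
  let count : List Int :=
    (PySem.List.pyRange 1 1001 1).foldl (fun cnt i =>
      (PySem.List.pyRange i 1001 i).foldl
        (fun c j => PySem.List.pySetD c j (PySem.List.pyGetD c j 0 + 1)) cnt)
      (List.replicate 1001 0)
  -- answer = 0; for i in range(left, right+1): answer -= i if count[i] % 2 == 1 else answer += i
  (PySem.List.pyRange left (right + 1) 1).foldl
    (fun answer i =>
      if PySem.Int.mod (PySem.List.pyGetD count i 0) 2 == 1 then answer - i else answer + i) 0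

-- ===== PORT B =====
-- _SQUARES = {k * k for k in range(1, 32)}
def pvSquares : PySem.Set Int := PySem.Set.ofList ((PySem.List.pyRange 1 32 1).map (fun k => k * k))
-- _SIGN = [-1 if n in _SQUARES else 1 for n in range(1001)]
def pvSign : List Int :=
  (PySem.List.pyRange 0 1001 1).map (fun n => if PySem.Set.contains pvSquares n then -1 else 1)
-- return sum(_SIGN[i] * i for i in range(left, right + 1))
def solution_alt (left : Int) (right : Int) : Int :=
  (PySem.List.pyRange left (right + 1) 1).foldl
    (fun acc i => acc + PySem.List.pyGetD pvSign i 0 * i) 0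

-- ===== PRECONDITION & SPEC =====
-- Pre_ excludes exactly the inputs where Python A raises IndexError: a nonempty
-- range(left, right+1) reaching an index outside [-1001, 1000] of the 1001-slot table.
def Pre_solution (left : Int) (right : Int) : Prop :=
  right < left ∨ (-1001 ≤ left ∧ right ≤ 1000)
instance (left : Int) (right : Int) : Decidable (Pre_solution left right) := by
  unfold Pre_solution; infer_instance
def pvWitness_solution : Int × Int := (1, 10)

def Spec_solution (left : Int) (right : Int) (out : Int) : Prop := out = solution_alt left right
instance (left : Int) (right : Int) (out : Int) : Decidable (Spec_solution left right out) := by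
  unfold Spec_solution; infer_instance

-- ===== CLAIM (what is proved, stated in full; the proofs are below) =====
def Claim_equal_solution : Prop := ∀ (left : Int) (right : Int), Dom_solution left right → Pre_solution left right → Spec_solution left right (solution left right)

-- ===== LEMMAS AND PROOFS =====

-- proof-side names for the pieces of A's port
def pvBump (c : List Int) (j : Int) : List Int :=
  PySem.List.pySetD c j (PySem.List.pyGetD c j 0 + 1)

def pvInner (c : List Int) (i : Int) : List Int :=
  (PySem.List.pyRange i 1001 i).foldl pvBump c

def pvPartial (m : Nat) : List Int :=
  (PySem.List.pyRange 1 ((m : Int) + 1) 1).foldl pvInner (List.replicate 1001 0)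

-- number of i in [1, m] that divide n, counting nothing for n = 0
def pvCnt (m n : Nat) : Nat :=
  ((Finset.range (m + 1)).filter (fun i => 1 ≤ i ∧ i ∣ n ∧ 1 ≤ n)).card

lemma pv_len_bumpFold (js : List Int) : ∀ c : List Int, (js.foldl pvBump c).length = c.length := by
  induction js with
  | nil => intro c; rfl
  | cons j js ih =>
      intro c
      simp only [List.foldl_cons, ih, pvBump, PySem.List.length_pySetD]

lemma pv_getD_bumpFold (js : List Int) : ∀ (c : List Int), js.Nodup →
    (∀ j ∈ js, 0 ≤ j ∧ j < (c.length : Int)) → ∀ n : Nat, n < c.length →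
    PySem.List.pyGetD (js.foldl pvBump c) (n : Int) 0 =
      PySem.List.pyGetD c (n : Int) 0 + (if (n : Int) ∈ js then 1 else 0) := by
  induction js with
  | nil => intro c _ _ n _; simp
  | cons j js ih =>
      intro c hnd hb n hn
      obtain ⟨hj0, hjlen⟩ := hb j (List.mem_cons_self)
      have hjn : j = ((j.toNat : Nat) : Int) := by omega
      have hjlt : j.toNat < c.length := by omega
      have hlen : (pvBump c j).length = c.length := by
        simp [pvBump, PySem.List.length_pySetD]
      have hnd' := (List.nodup_cons.mp hnd)
      have ihr := ih (pvBump c j) hnd'.2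
        (fun x hx => by rw [hlen]; exact hb x (List.mem_cons_of_mem _ hx)) n (by omega)
      rw [List.foldl_cons, ihr, pvBump, hjn,
        PySem.List.pyGetD_pySetD_natCast c j.toNat n _ 0 hjlt]
      by_cases hcase : n = j.toNat
      · have hmem : ((n : Int)) = ((j.toNat : Nat) : Int) := by omega
        have hnin : ((n : Int)) ∉ js := by rw [hmem, ← hjn]; exact hnd'.1
        rw [if_pos hcase, if_neg hnin, hmem,
          if_pos (List.mem_cons_self (a := ((j.toNat : Nat) : Int)) (l := js)), add_zero]
      · have hne : ((n : Int)) ≠ ((j.toNat : Nat) : Int) := by omega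
        have hiff : ((n : Int) ∈ ((j.toNat : Nat) : Int) :: js) ↔ ((n : Int) ∈ js) := by
          rw [List.mem_cons]; exact or_iff_right hne
        rw [if_neg hcase]
        simp only [hiff]

lemma pv_nodup_pyRange_pos (a b : Int) {s : Int} (hs : 0 < s) :
    (PySem.List.pyRange a b s).Nodup := by
  rw [PySem.List.pyRange_of_pos a b hs]
  refine List.Nodup.map ?_ (List.nodup_range)
  intro k1 k2 h
  have h2 : s * (k1 : Int) = s * (k2 : Int) := by
    have := add_left_cancel h
    linarith
  have := mul_left_cancel₀ (ne_of_gt hs) h2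
  exact_mod_cast this

lemma pv_getD_inner (i : Int) (hi : 1 ≤ i) (c : List Int) (hc : c.length = 1001)
    (n : Nat) (hn : n < 1001) :
    PySem.List.pyGetD (pvInner c i) (n : Int) 0 =
      PySem.List.pyGetD c (n : Int) 0 + (if (1 ≤ n ∧ i ∣ (n : Int)) then 1 else 0) := by
  have hi0 : 0 < i := by omega
  have hb : ∀ j ∈ PySem.List.pyRange i 1001 i, 0 ≤ j ∧ j < (c.length : Int) := by
    intro j hj
    rw [PySem.List.mem_pyRange_iff_of_pos hi0] at hj
    constructor <;> [omega; (rw [hc]; exact_mod_cast hj.2.1)]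
  have hmem : ((n : Int) ∈ PySem.List.pyRange i 1001 i) ↔ (1 ≤ n ∧ i ∣ (n : Int)) := by
    rw [PySem.List.mem_pyRange_iff_of_pos hi0]
    constructor
    · rintro ⟨h1, h2, h3⟩
      refine ⟨by omega, ?_⟩
      have := dvd_add h3 (dvd_refl i)
      simpa using this
    · rintro ⟨h1, h2⟩
      have hn0 : (0 : Int) < (n : Int) := by exact_mod_cast h1
      refine ⟨Int.le_of_dvd hn0 h2, by exact_mod_cast hn, dvd_sub h2 (dvd_refl i)⟩
  rw [pvInner, pv_getD_bumpFold _ c (pv_nodup_pyRange_pos _ _ hi0) hb n (by omega)]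
  simp only [hmem]

lemma pv_partial_spec : ∀ m : Nat, m ≤ 1000 →
    (pvPartial m).length = 1001 ∧
    ∀ n : Nat, n < 1001 → PySem.List.pyGetD (pvPartial m) (n : Int) 0 = (pvCnt m n : Int) := by
  intro m
  induction m with
  | zero =>
      intro _
      have hnil : PySem.List.pyRange 1 ((0 : Nat) + 1 : Int) 1 = [] := by
        apply PySem.List.pyRange_one_eq_nil; norm_num
      have hcnt0 : ∀ n : Nat, pvCnt 0 n = 0 := by
        intro n
        unfold pvCnt
        rw [Finset.card_eq_zero, Finset.filter_eq_empty_iff]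
        intro i hi
        rintro ⟨h1, -, -⟩
        simp only [Finset.mem_range] at hi
        omega
      constructor
      · rw [pvPartial, hnil]
        simp only [List.foldl_nil, List.length_replicate]
      · intro n hn
        rw [pvPartial, hnil]
        simp only [List.foldl_nil, PySem.List.pyGetD_natCast, hcnt0, Nat.cast_zero]
        exact List.getD_replicate (0 : Int) hn
  | succ m ih =>
      intro hm
      obtain ⟨ihlen, ihval⟩ := ih (by omega)
      have hsplit : PySem.List.pyRange 1 (((m + 1 : Nat) : Int) + 1) 1 =
          PySem.List.pyRange 1 ((m : Int) + 1) 1 ++ [(m : Int) + 1] := by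
        have := PySem.List.pyRange_one_succ_right (a := 1) (b := (m : Int) + 1) (by omega)
        rw [← this]
        norm_num
      have hstep : pvPartial (m + 1) = pvInner (pvPartial m) ((m : Int) + 1) := by
        rw [pvPartial, hsplit, List.foldl_append]
        rfl
      have hlen : (pvPartial (m + 1)).length = 1001 := by
        rw [hstep, pvInner, pv_len_bumpFold, ihlen]
      refine ⟨hlen, ?_⟩
      intro n hn
      have hcast : ((m : Int) + 1) = (((m + 1 : Nat)) : Int) := by push_cast; ring
      have hval := pv_getD_inner ((m : Int) + 1) (by omega) (pvPartial m) ihlen n hn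
      rw [hstep, hval, ihval n hn]
      have hdvd : (((m : Int) + 1) ∣ (n : Int)) ↔ ((m + 1) ∣ n) := by
        rw [hcast]; exact Int.natCast_dvd_natCast
      have hcnt : pvCnt (m + 1) n = pvCnt m n + (if (1 ≤ n ∧ (m + 1) ∣ n) then 1 else 0) := by
        unfold pvCnt
        rw [Finset.range_add_one, Finset.filter_insert]
        by_cases hp : 1 ≤ m + 1 ∧ (m + 1) ∣ n ∧ 1 ≤ n
        · rw [if_pos hp, Finset.card_insert_of_notMem (by
            intro hmemf
            have := (Finset.mem_filter.mp hmemf).1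
            simp at this)]
          rw [if_pos ⟨hp.2.2, hp.2.1⟩]
        · rw [if_neg hp, if_neg (by rintro ⟨h1, h2⟩; exact hp ⟨by omega, h2, h1⟩)]
          omega
      rw [hcnt]
      push_cast
      simp only [hdvd]

lemma pv_cnt_zero (m : Nat) : pvCnt m 0 = 0 := by
  unfold pvCnt
  rw [Finset.card_eq_zero, Finset.filter_eq_empty_iff]
  rintro i - ⟨-, -, h⟩
  omega

lemma pv_cnt_divisors (n : Nat) (h1 : 1 ≤ n) (h2 : n ≤ 1000) :
    pvCnt 1000 n = n.divisors.card := by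
  unfold pvCnt
  refine congrArg Finset.card (Finset.ext fun i => ?_)
  simp only [Finset.mem_filter, Finset.mem_range, Nat.mem_divisors]
  constructor
  · rintro ⟨-, -, hd, -⟩; exact ⟨hd, by omega⟩
  · rintro ⟨hd, -⟩
    have hi1 : 1 ≤ i := Nat.pos_of_dvd_of_pos hd (by omega)
    have hin : i ≤ n := Nat.le_of_dvd (by omega) hd
    exact ⟨by omega, hi1, hd, h1⟩

lemma pv_odd_card_divisors_iff (n : Nat) (hn : n ≠ 0) :
    (n.divisors.card % 2 = 1) ↔ IsSquare n := by
  rw [Nat.card_divisors hn]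
  constructor
  · intro hodd
    have heven : ∀ p ∈ n.primeFactors, Even (n.factorization p) := by
      intro p hp
      by_contra hodd2
      have h2 : 2 ∣ (n.factorization p + 1) := by
        rcases Nat.even_or_odd (n.factorization p) with he | ho
        · exact absurd he hodd2
        · obtain ⟨k, hk⟩ := ho; omega
      have hdp : 2 ∣ n.primeFactors.prod (n.factorization · + 1) :=
        dvd_trans h2 (Finset.dvd_prod_of_mem _ hp)
      exact absurd hdp (by omega)
    have hsq : (n.factorization.prod fun p k => p ^ (k / 2)) *
        (n.factorization.prod fun p k => p ^ (k / 2)) = n := by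
      conv_rhs => rw [← Nat.prod_factorization_pow_eq_self hn]
      show (∏ p ∈ n.factorization.support, p ^ (n.factorization p / 2)) *
          (∏ p ∈ n.factorization.support, p ^ (n.factorization p / 2)) =
          ∏ p ∈ n.factorization.support, p ^ n.factorization p
      rw [← Finset.prod_mul_distrib]
      refine Finset.prod_congr rfl fun p hp => ?_
      rw [← pow_add]
      congr 1
      obtain ⟨k, hk⟩ := heven p (by rwa [Nat.support_factorization] at hp)
      omega
    exact ⟨_, hsq.symm⟩
  · rintro ⟨r, hr⟩
    have hr0 : r ≠ 0 := by rintro rfl; rw [mul_zero] at hr; exact hn hr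
    subst hr
    have hnd : ¬ (2 ∣ (r * r).primeFactors.prod (((r * r).factorization) · + 1)) := by
      intro hdvd
      obtain ⟨p, hp, hp2⟩ := (Prime.dvd_finset_prod_iff Nat.prime_two.prime _).mp hdvd
      rw [Nat.factorization_mul hr0 hr0, Finsupp.add_apply] at hp2
      omega
    omega
lemma pv_contains_squares (n : Nat) (h2 : n ≤ 1000) :
    PySem.Set.contains pvSquares (n : Int) = true ↔ (1 ≤ n ∧ IsSquare n) := by
  rw [PySem.Set.contains_iff, pvSquares, PySem.Set.mem_ofList, List.mem_map]
  constructor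
  · rintro ⟨k, hk, hkk⟩
    rw [PySem.List.mem_pyRange_one] at hk
    obtain ⟨hk1, hk2⟩ := hk
    have hkn : k = ((k.toNat : Nat) : Int) := by omega
    have hcast : ((k.toNat * k.toNat : Nat) : Int) = ((n : Nat) : Int) := by
      push_cast
      rw [← hkn]
      exact hkk
    have hval : k.toNat * k.toNat = n := by exact_mod_cast hcast
    constructor
    · have : 1 ≤ k.toNat := by omega
      calc 1 ≤ k.toNat * k.toNat := Nat.one_le_iff_ne_zero.mpr (by positivity)
        _ = n := hval
    · exact ⟨k.toNat, hval.symm⟩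
  · rintro ⟨h1, r, hr⟩
    have hr1 : 1 ≤ r := by
      rcases Nat.eq_zero_or_pos r with h | h
      · subst h; omega
      · exact h
    have hr31 : r ≤ 31 := by
      by_contra hgt
      have h32 : 32 ≤ r := by omega
      have : 32 * 32 ≤ r * r := Nat.mul_le_mul h32 h32
      omega
    refine ⟨(r : Int), ?_, ?_⟩
    · rw [PySem.List.mem_pyRange_one]
      constructor <;> [exact_mod_cast hr1; exact_mod_cast (by omega : r < 32)]
    · rw [hr]; push_cast; ring

lemma pv_sign_len : pvSign.length = 1001 := by
  simp [pvSign, PySem.List.length_pyRange_one]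

lemma pv_sign_getD (n : Nat) (hn : n < 1001) :
    PySem.List.pyGetD pvSign (n : Int) 0 =
      (if PySem.Set.contains pvSquares (n : Int) then -1 else 1) := by
  have h1001 : (1001 : Int) = ((1001 : Nat) : Int) := by norm_num
  rw [pvSign, h1001,
    PySem.List.pyGetD_map_pyRange (fun m => if PySem.Set.contains pvSquares m then -1 else 1)
      1001 n 0 hn]

-- the two fixed tables decide every branch the same way
lemma pv_tables (n : Nat) (hn : n < 1001) :
    (PySem.Int.mod (PySem.List.pyGetD (pvPartial 1000) (n : Int) 0) 2 == 1) =
      PySem.Set.contains pvSquares (n : Int) := by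
  have hval := (pv_partial_spec 1000 (le_refl _)).2 n hn
  rw [hval, PySem.Int.mod_eq_emod_of_pos (by norm_num : (0 : Int) < 2)]
  by_cases h0 : n = 0
  · subst h0
    rw [pv_cnt_zero]
    decide
  · have h1 : 1 ≤ n := by omega
    have h2 : n ≤ 1000 := by omega
    rw [pv_cnt_divisors n h1 h2, Bool.eq_iff_iff, beq_iff_eq]
    have hiff := pv_odd_card_divisors_iff n (by omega)
    have hsq := pv_contains_squares n h2
    constructor
    · intro h
      exact hsq.mpr ⟨h1, hiff.mp (by omega)⟩
    · intro h
      have := (hsq.mp h).2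
      have := hiff.mpr this
      omega

-- ===== VERDICT (by name: the statement is the Claim_ definition above) =====
theorem solution_spec : Claim_equal_solution := by
  intro left right _ hpre
  unfold Spec_solution
  have hA : solution left right =
      (PySem.List.pyRange left (right + 1) 1).foldl
        (fun answer i =>
          if PySem.Int.mod (PySem.List.pyGetD (pvPartial 1000) i 0) 2 == 1 then answer - i
          else answer + i) 0 := rfl
  rw [hA, solution_alt]
  rcases hpre with hlt | ⟨hl, hr⟩
  · rw [PySem.List.pyRange_one_eq_nil (by omega)]
    rfl
  · refine PySem.List.foldl_congr_mem _ _ _ _ ?_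
    intro acc i hi
    rw [PySem.List.mem_pyRange_one] at hi
    have hlen1 : (pvPartial 1000).length = 1001 := (pv_partial_spec 1000 (le_refl _)).1
    have hlen2 : pvSign.length = 1001 := pv_sign_len
    rcases (by omega : 0 ≤ i ∨ i < 0) with hpos | hneg
    · have hi2 : i = ((i.toNat : Nat) : Int) := by omega
      have hnlt : i.toNat < 1001 := by omega
      rw [hi2, pv_tables i.toNat hnlt, pv_sign_getD i.toNat hnlt]
      split_ifs with h <;> ring
    · have hk1 : 0 < (-i).toNat := by omega
      have hik : i = -(((-i).toNat : Nat) : Int) := by omega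
      rw [hik, PySem.List.pyGetD_neg_natCast _ (-i).toNat 0 hk1 (by omega),
        PySem.List.pyGetD_neg_natCast _ (-i).toNat 0 hk1 (by omega)]
      have hnlt : 1001 - (-i).toNat < 1001 := by omega
      have e1 := PySem.List.pyGetD_eq_getElem (pvPartial 1000)
        (i := ((1001 - (-i).toNat : Nat) : Int)) 0 (by omega) (by omega)
      have e2 := PySem.List.pyGetD_eq_getElem pvSign
        (i := ((1001 - (-i).toNat : Nat) : Int)) 0 (by omega) (by omega)
      simp only [Int.toNat_natCast] at e1 e2
      simp only [hlen1, hlen2]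
      rw [← e1, ← e2, pv_tables _ hnlt, pv_sign_getD _ hnlt]
      split_ifs with h <;> ring
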